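-- pv_equiv track=rewrite | github.com/titulartarantula/canvas-rss | src/scrapers/instructure_community.py | _deduplicate_refs
-- ===== SOURCE A (Python) =====
-- from typing import Dict, List, Optional, Tuple, TYPE_CHECKING
--
-- MENTION_TYPE_PRIORITY = ['announces', 'questions', 'discusses', 'feedback', 'mentions']
--
-- def _deduplicate_refs(
--     refs: List[Tuple[str, Optional[str], str]]
-- ) -> List[Tuple[str, Optional[str], str]]:
--     """Deduplicate refs, keeping strongest mention_type per feature/option pair.
--
--     Args:
--         refs: List of (feature_id, option_id, mention_type) tuples.
--
--     Returns:
--         Deduplicated list with strongest mention_type per pair.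
--     """
--     # Group by (feature_id, option_id)
--     best: Dict[Tuple[str, Optional[str]], str] = {}
--
--     for feature_id, option_id, mention_type in refs:
--         key = (feature_id, option_id)
--
--         if key not in best:
--             best[key] = mention_type
--         else:
--             # Keep the stronger mention_type (lower index in priority list)
--             current_priority = MENTION_TYPE_PRIORITY.index(best[key]) if best[key] in MENTION_TYPE_PRIORITY else 999
--             new_priority = MENTION_TYPE_PRIORITY.index(mention_type) if mention_type in MENTION_TYPE_PRIORITY else 999
--
--             if new_priority < current_priority:
--                 best[key] = mention_type
--
--     return [(fid, oid, mtype) for (fid, oid), mtype in best.items()]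
-- ===== SOURCE B (Python) =====
-- from typing import List, Optional, Tuple
--
-- MENTION_TYPE_PRIORITY = ['announces', 'questions', 'discusses', 'feedback', 'mentions']
--
--
-- def _priority(m: str) -> int:
--     return MENTION_TYPE_PRIORITY.index(m) if m in MENTION_TYPE_PRIORITY else 999
--
--
-- def _deduplicate_refs(
--     refs: List[Tuple[str, Optional[str], str]]
-- ) -> List[Tuple[str, Optional[str], str]]:
--     """No dict: walk refs, and at each first appearance of a (feature_id, option_id)
--     pair rescan the whole list for that pair's mention_types and emit the strongest."""
--     out: List[Tuple[str, Optional[str], str]] = []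
--     seen: List[Tuple[str, Optional[str]]] = []
--     for fid, oid, _ in refs:
--         key = (fid, oid)
--         if key in seen:
--             continue
--         seen.append(key)
--         types = [m for f, o, m in refs if (f, o) == key]
--         out.append((fid, oid, min(types, key=_priority)))
--     return out
-- ===== Notes on version B (the rewrite author's own statement) =====
-- stated objective: alternative
-- what changed: A's streaming dict with compare-and-update is replaced by a dict-free nested scan: a seen-list detects each key's first appearance, and for each new key the whole input is rescanned to collect its mention_types and min(key=priority) picks the strongest.
import Mathlib
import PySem

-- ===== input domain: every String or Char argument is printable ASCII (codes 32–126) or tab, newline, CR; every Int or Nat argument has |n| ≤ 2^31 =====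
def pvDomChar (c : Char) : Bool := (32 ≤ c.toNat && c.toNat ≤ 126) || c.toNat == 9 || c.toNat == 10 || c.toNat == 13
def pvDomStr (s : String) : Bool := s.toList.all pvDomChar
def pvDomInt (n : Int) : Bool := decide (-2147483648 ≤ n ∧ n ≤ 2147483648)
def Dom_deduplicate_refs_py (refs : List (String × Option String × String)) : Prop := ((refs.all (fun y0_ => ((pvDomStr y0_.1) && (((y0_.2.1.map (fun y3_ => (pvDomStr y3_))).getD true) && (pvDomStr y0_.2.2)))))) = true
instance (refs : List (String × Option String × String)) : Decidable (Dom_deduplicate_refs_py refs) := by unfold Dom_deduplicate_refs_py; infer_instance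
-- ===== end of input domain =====

-- B drops A's streaming best-so-far dict for a dict-free nested scan (seen-list of first appearances + rescan per new key); alternative decomposition, same behaviour.

-- ===== PORT A =====
-- module constant MENTION_TYPE_PRIORITY
def pvMENTION : List String := ["announces", "questions", "discusses", "feedback", "mentions"]

-- `MENTION_TYPE_PRIORITY.index(m) if m in MENTION_TYPE_PRIORITY else 999` (index? is some when m is a member)
def pvPrio (m : String) : Int :=
  if pvMENTION.contains m then (((PySem.List.index? pvMENTION m).getD 999 : Nat) : Int) else 999

-- the body of A's for-loop (d = `best`); `best[key]` is exact via getD since the branch has key ∈ best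
def pvStepA (d : PySem.Dict (String × Option String) String)
    (r : String × Option String × String) : PySem.Dict (String × Option String) String :=
  let key := (r.1, r.2.1)
  if d.contains key = false then
    d.insert key r.2.2
  else
    let current_priority := pvPrio (d.getD key "")
    let new_priority := pvPrio r.2.2
    if new_priority < current_priority then d.insert key r.2.2 else d

def deduplicate_refs_py (refs : List (String × Option String × String)) :
    List (String × Option String × String) :=
  ((refs.foldl pvStepA PySem.Dict.empty).items).map (fun p => (p.1.1, p.1.2, p.2))

-- ===== PORT B =====
-- the body of B's loop over (seen, out); `key in seen` is List.contains, the
-- comprehension `[m for f, o, m in refs if (f, o) == key]` is filter-then-map,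
-- min(types, key=_priority) is PySem.List.minD (first minimal; types is nonempty)
def pvStepB (all : List (String × Option String × String))
    (st : List (String × Option String) × List (String × Option String × String))
    (r : String × Option String × String) :
    List (String × Option String) × List (String × Option String × String) :=
  let key := (r.1, r.2.1)
  if st.1.contains key then st
  else
    (st.1 ++ [key],
     st.2 ++ [(r.1, r.2.1,
       PySem.List.minD ((all.filter (fun q => (q.1, q.2.1) == key)).map (fun q => q.2.2)) pvPrio "")])

def deduplicate_refs_py_alt (refs : List (String × Option String × String)) :
    List (String × Option String × String) :=
  (refs.foldl (pvStepB refs)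
    (([] : List (String × Option String)), ([] : List (String × Option String × String)))).2

-- ===== PRECONDITION & SPEC =====
def Spec_deduplicate_refs_py (refs : List (String × Option String × String)) (out : List (String × Option String × String)) : Prop := out = deduplicate_refs_py_alt refs
instance (refs : List (String × Option String × String)) (out : List (String × Option String × String)) : Decidable (Spec_deduplicate_refs_py refs out) := by unfold Spec_deduplicate_refs_py; infer_instance

-- ===== CLAIM (what is proved, stated in full; the proofs are below) =====
def Claim_equal_deduplicate_refs_py : Prop := ∀ (refs : List (String × Option String × String)), Dom_deduplicate_refs_py refs → Spec_deduplicate_refs_py refs (deduplicate_refs_py refs)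

-- ===== LEMMAS AND PROOFS =====

-- the key of a ref
def pvKey (r : String × Option String × String) : String × Option String := (r.1, r.2.1)

-- first-appearance distinct keys, as a left fold
def pvDStep (acc : List (String × Option String)) (r : String × Option String × String) :
    List (String × Option String) :=
  if acc.contains (pvKey r) then acc else acc ++ [pvKey r]

def pvDedup (l : List (String × Option String × String)) : List (String × Option String) :=
  l.foldl pvDStep []

-- first-appearance distinct keys NOT already in `seen` (mirrors B's loop shape)
def pvDedupFrom : List (String × Option String) → List (String × Option String × String) →
    List (String × Option String)
  | _, [] => []
  | seen, r :: rest =>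
    if seen.contains (pvKey r) then pvDedupFrom seen rest
    else pvKey r :: pvDedupFrom (seen ++ [pvKey r]) rest

-- all mention_types of key k in l, in order
def pvMent (l : List (String × Option String × String)) (k : String × Option String) :
    List String :=
  (l.filter (fun q => (q.1, q.2.1) == k)).map (fun q => q.2.2)

def pvPick (l : List String) : String := PySem.List.minD l pvPrio ""

-- the step function of PySem.List.min? at key pvPrio
def pvMinStep (acc : Option String) (x : String) : Option String :=
  match acc with
  | none => some x
  | some m => if pvPrio x < pvPrio m then some x else some m

theorem pvMin?_eq_foldl (l : List String) :
    PySem.List.min? l pvPrio = l.foldl pvMinStep none := by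
  simp only [PySem.List.min?]
  congr 1
  funext acc x
  cases acc <;> rfl

theorem pvMin?_append_singleton (l : List String) (t : String) :
    PySem.List.min? (l ++ [t]) pvPrio = pvMinStep (PySem.List.min? l pvPrio) t := by
  rw [pvMin?_eq_foldl, pvMin?_eq_foldl, List.foldl_append]
  rfl

theorem pvFoldl_minStep_isSome (l : List String) (acc : Option String)
    (h : acc.isSome = true) : (l.foldl pvMinStep acc).isSome = true := by
  induction l generalizing acc with
  | nil => simpa using h
  | cons a as ih =>
    rw [List.foldl_cons]
    apply ih
    rcases acc with _ | m
    · simp at h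
    · simp only [pvMinStep]; split <;> rfl

theorem pvMin?_isSome (l : List String) (h : l ≠ []) :
    (PySem.List.min? l pvPrio).isSome = true := by
  cases l with
  | nil => exact absurd rfl h
  | cons a as =>
    rw [pvMin?_eq_foldl, List.foldl_cons]
    exact pvFoldl_minStep_isSome as (pvMinStep none a) rfl

theorem pvPick_append_singleton (l : List String) (t : String) (h : l ≠ []) :
    pvPick (l ++ [t]) = if pvPrio t < pvPrio (pvPick l) then t else pvPick l := by
  obtain ⟨m, hm⟩ := Option.isSome_iff_exists.mp (pvMin?_isSome l h)
  simp only [pvPick, PySem.List.minD, pvMin?_append_singleton, hm, pvMinStep,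
    Option.getD_some]
  split <;> rfl

-- membership in the dedup fold
theorem pvMem_foldl_dStep (l : List (String × Option String × String))
    (acc : List (String × Option String)) (k : String × Option String) :
    k ∈ l.foldl pvDStep acc ↔ k ∈ acc ∨ ∃ r ∈ l, pvKey r = k := by
  induction l generalizing acc with
  | nil => simp
  | cons a as ih =>
    rw [List.foldl_cons, ih]
    simp only [pvDStep]
    by_cases hc : pvKey a ∈ acc
    · rw [if_pos (by simp [hc])]
      constructor
      · rintro (h | h)
        · exact Or.inl h
        · obtain ⟨r, hr, hk⟩ := h
          exact Or.inr ⟨r, List.mem_cons_of_mem _ hr, hk⟩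
      · rintro (h | ⟨r, hr, hk⟩)
        · exact Or.inl h
        · rcases List.mem_cons.1 hr with rfl | hr'
          · exact Or.inl (hk ▸ hc)
          · exact Or.inr ⟨r, hr', hk⟩
    · rw [if_neg (by simp [hc])]
      constructor
      · rintro (h | h)
        · rcases List.mem_append.1 h with h' | h'
          · exact Or.inl h'
          · exact Or.inr ⟨a, List.mem_cons_self, (List.mem_singleton.1 h').symm⟩
        · obtain ⟨r, hr, hk⟩ := h
          exact Or.inr ⟨r, List.mem_cons_of_mem _ hr, hk⟩
      · rintro (h | ⟨r, hr, hk⟩)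
        · exact Or.inl (List.mem_append_left _ h)
        · rcases List.mem_cons.1 hr with rfl | hr'
          · exact Or.inl (List.mem_append_right _ (by simp [hk]))
          · exact Or.inr ⟨r, hr', hk⟩

theorem pvMem_dedup (l : List (String × Option String × String)) (k : String × Option String) :
    k ∈ pvDedup l ↔ ∃ r ∈ l, pvKey r = k := by
  rw [pvDedup, pvMem_foldl_dStep]; simp

theorem pvNodup_foldl_dStep (l : List (String × Option String × String))
    (acc : List (String × Option String)) (h : acc.Nodup) :
    (l.foldl pvDStep acc).Nodup := by
  induction l generalizing acc with
  | nil => simpa using h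
  | cons a as ih =>
    rw [List.foldl_cons]
    apply ih
    simp only [pvDStep]
    by_cases hc : pvKey a ∈ acc
    · rw [if_pos (by simp [hc])]; exact h
    · rw [if_neg (by simp [hc])]
      simp [List.nodup_append, h]
      intro a1 b hab heq
      exact hc (heq ▸ hab)

theorem pvNodup_dedup (l : List (String × Option String × String)) : (pvDedup l).Nodup :=
  pvNodup_foldl_dStep l [] List.nodup_nil

theorem pvMent_eq_nil (l : List (String × Option String × String)) (k : String × Option String)
    (h : ¬ ∃ r ∈ l, pvKey r = k) : pvMent l k = [] := by
  simp only [pvMent, List.map_eq_nil_iff, List.filter_eq_nil_iff]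
  intro q hq
  simp only [beq_iff_eq]
  exact fun hk => h ⟨q, hq, hk⟩

theorem pvMent_ne_nil (l : List (String × Option String × String)) (k : String × Option String)
    (r : String × Option String × String) (hr : r ∈ l) (hk : pvKey r = k) : pvMent l k ≠ [] := by
  simp only [pvMent, ne_eq, List.map_eq_nil_iff, List.filter_eq_nil_iff]
  intro h
  exact h r hr (by simp [← hk, pvKey])

theorem pvMent_append_singleton (l : List (String × Option String × String))
    (x : String × Option String × String) (k : String × Option String) :
    pvMent (l ++ [x]) k = pvMent l k ++ (if pvKey x = k then [x.2.2] else []) := by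
  simp only [pvMent, List.filter_append, List.map_append]
  congr 1
  simp only [pvKey, List.filter_cons, List.filter_nil]
  split <;> rename_i h
  · rw [if_pos (beq_iff_eq.mp (by exact h))]; rfl
  · rw [if_neg (fun hk => h (beq_iff_eq.mpr hk))]; rfl

-- keys of A's dict after a fold = pvDedup
theorem pvKeys_of_items_eq (d : PySem.Dict (String × Option String) String)
    (ks : List (String × Option String)) (g : (String × Option String) → String)
    (h : d.items = ks.map (fun k => (k, g k))) : d.keys = ks := by
  simp [PySem.Dict.keys, h, Function.comp_def]

-- characterisation of A's fold: items = dedup keys paired with the strongest mention over the whole prefix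
theorem pvA_char (l : List (String × Option String × String)) :
    (l.foldl pvStepA PySem.Dict.empty).items =
      (pvDedup l).map (fun k => (k, pvPick (pvMent l k))) := by
  induction l using List.reverseRecOn with
  | nil => simp [pvDedup, PySem.Dict.empty]
  | append_singleton l x ih =>
    rw [List.foldl_append, List.foldl_cons, List.foldl_nil]
    set d := l.foldl pvStepA PySem.Dict.empty with hd
    have hkeys : d.keys = pvDedup l := pvKeys_of_items_eq d _ _ ih
    have hnd : d.keys.Nodup := hkeys ▸ pvNodup_dedup l
    have hdedup : pvDedup (l ++ [x]) = pvDStep (pvDedup l) x := by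
      simp [pvDedup, List.foldl_append]
    by_cases hmem : pvKey x ∈ pvDedup l
    · -- key already present: A compares priorities
      have hc : d.contains (pvKey x) = true :=
        (PySem.Dict.contains_iff_mem_keys d _).2 (hkeys ▸ hmem)
      have hgd : d.getD (pvKey x) "" = pvPick (pvMent l (pvKey x)) := by
        have hmi : (pvKey x, pvPick (pvMent l (pvKey x))) ∈ d.items := by
          rw [ih]; exact List.mem_map.mpr ⟨pvKey x, hmem, rfl⟩
        exact PySem.Dict.getD_of_mem_items d hmi hnd ""
      have hdd : pvDedup (l ++ [x]) = pvDedup l := by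
        rw [hdedup]; simp [pvDStep, hmem]
      obtain ⟨r0, hr0, hk0⟩ := (pvMem_dedup l (pvKey x)).1 hmem
      have hmne : pvMent l (pvKey x) ≠ [] := pvMent_ne_nil l _ r0 hr0 hk0
      have hpicknew : pvPick (pvMent (l ++ [x]) (pvKey x)) =
          if pvPrio x.2.2 < pvPrio (pvPick (pvMent l (pvKey x))) then x.2.2
          else pvPick (pvMent l (pvKey x)) := by
        rw [pvMent_append_singleton, if_pos rfl, pvPick_append_singleton _ _ hmne]
      have hcT : d.contains (x.1, x.2.1) = true := hc
      have hgdT : d.getD (x.1, x.2.1) "" = pvPick (pvMent l (pvKey x)) := hgd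
      have hstep : pvStepA d x =
          if pvPrio x.2.2 < pvPrio (pvPick (pvMent l (pvKey x))) then
            d.insert (pvKey x) x.2.2 else d := by
        simp only [pvStepA, hcT, hgdT]
        simp
        rfl
      rw [hstep, hdd]
      by_cases hlt : pvPrio x.2.2 < pvPrio (pvPick (pvMent l (pvKey x)))
      · rw [if_pos hlt, PySem.Dict.items_insert_of_contains d _ hc, ih, List.map_map]
        refine List.map_congr_left ?_
        intro k hk
        simp only [Function.comp_apply]
        by_cases hkx : k = pvKey x
        · subst hkx
          simp [hpicknew, hlt]
        · have hb : ((k, pvPick (pvMent l k)).1 == pvKey x) = false := by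
            simpa using hkx
          rw [if_neg (by simp [hb]), pvMent_append_singleton,
            if_neg (fun h => hkx h.symm), List.append_nil]
      · rw [if_neg hlt, ih]
        refine List.map_congr_left ?_
        intro k hk
        by_cases hkx : k = pvKey x
        · subst hkx
          rw [hpicknew, if_neg hlt]
        · rw [pvMent_append_singleton, if_neg (fun h => hkx h.symm), List.append_nil]
    · -- fresh key: A inserts, its group so far is just [x.2.2]
      have hc : d.contains (pvKey x) = false := by
        rw [← Bool.not_eq_true]
        exact fun hct => hmem (hkeys ▸ (PySem.Dict.contains_iff_mem_keys d _).1 hct)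
      have hcF : d.contains (x.1, x.2.1) = false := hc
      have hstep : pvStepA d x = d.insert (pvKey x) x.2.2 := by
        simp only [pvStepA, hcF]
        simp [pvKey]
      have hdd : pvDedup (l ++ [x]) = pvDedup l ++ [pvKey x] := by
        rw [hdedup]
        simp only [pvDStep]
        rw [if_neg (by simp [hmem])]
      have hm0 : pvMent l (pvKey x) = [] :=
        pvMent_eq_nil l _ (fun h => hmem ((pvMem_dedup l _).2 h))
      rw [hstep, PySem.Dict.items_insert_of_not_contains d _ hc, ih, hdd, List.map_append]
      congr 1
      · refine List.map_congr_left ?_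
        intro k hk
        have hkx : k ≠ pvKey x := fun h => hmem (h ▸ hk)
        rw [pvMent_append_singleton, if_neg (fun h => hkx h.symm), List.append_nil]
      · rw [List.map_singleton, pvMent_append_singleton, if_pos rfl, hm0]
        simp [pvPick, PySem.List.minD, PySem.List.min?]

-- characterisation of B's fold: out grows by the fresh keys, each with its min over `all`
theorem pvB_char (all l : List (String × Option String × String))
    (seen : List (String × Option String)) (out : List (String × Option String × String)) :
    (l.foldl (pvStepB all) (seen, out)).2 =
      out ++ (pvDedupFrom seen l).map (fun k => (k.1, k.2, pvPick (pvMent all k))) := by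
  induction l generalizing seen out with
  | nil => simp [pvDedupFrom]
  | cons r rest ih =>
    rw [List.foldl_cons]
    by_cases hc : (r.1, r.2.1) ∈ seen
    · have hs : pvStepB all (seen, out) r = (seen, out) := by
        simp [pvStepB, hc]
      have hdf : pvDedupFrom seen (r :: rest) = pvDedupFrom seen rest := by
        simp [pvDedupFrom, pvKey, hc]
      rw [hs, ih, hdf]
    · have hs : pvStepB all (seen, out) r =
          (seen ++ [(r.1, r.2.1)],
           out ++ [(r.1, r.2.1, pvPick (pvMent all (r.1, r.2.1)))]) := by
        simp [pvStepB, hc, pvPick, pvMent]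
      have hdf : pvDedupFrom seen (r :: rest) =
          (r.1, r.2.1) :: pvDedupFrom (seen ++ [(r.1, r.2.1)]) rest := by
        simp [pvDedupFrom, pvKey, hc]
      rw [hs, ih, hdf]
      simp

-- the two dedup shapes agree
theorem pvFoldl_dStep_eq (l : List (String × Option String × String))
    (seen : List (String × Option String)) :
    l.foldl pvDStep seen = seen ++ pvDedupFrom seen l := by
  induction l generalizing seen with
  | nil => simp [pvDedupFrom]
  | cons r rest ih =>
    rw [List.foldl_cons]
    simp only [pvDStep]
    by_cases hc : pvKey r ∈ seen
    · rw [if_pos (by simp [hc]), ih]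
      simp [pvDedupFrom, hc]
    · rw [if_neg (by simp [hc]), ih]
      simp [pvDedupFrom, hc]

-- ===== VERDICT (by name: the statement is the Claim_ definition above) =====
theorem deduplicate_refs_py_spec : Claim_equal_deduplicate_refs_py := by
  intro refs _
  unfold Spec_deduplicate_refs_py deduplicate_refs_py deduplicate_refs_py_alt
  rw [pvA_char, pvB_char refs refs [] []]
  have hdd : pvDedup refs = pvDedupFrom [] refs := by
    rw [pvDedup, pvFoldl_dStep_eq]; simp
  rw [hdd, List.map_map, List.nil_append]
  rfl
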